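-- pv_equiv track=rewrite | github.com/Glenmark-2/Leilife-Cafe-Food-and-Ordering-System | backend/ML/sentiment_analyzer.py | handle_negation
-- ===== SOURCE A (Python) =====
-- def handle_negation(text: str) -> str:
--     # Simple approach: prepend "NEG_" to words after "not" for the model to catch negation
--     words = text.split()
--     new_words = []
--     negate = False
--     for w in words:
--         if w in {"not", "hindi"}:  # Add more negation words if needed
--             negate = True
--             new_words.append(w)
--         elif negate:
--             new_words.append("NEG_" + w)
--             negate = False
--         else:
--             new_words.append(w)
--     return " ".join(new_words)
-- ===== SOURCE B (Python) =====
-- def handle_negation(text: str) -> str: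
--     NEG = {"not", "hindi"}
--     words = text.split()
--     # Stateless: each word is decided from its predecessor via zip.
--     rest = ["NEG_" + w if p in NEG and w not in NEG else w
--             for p, w in zip(words, words[1:])]
--     return " ".join(words[:1] + rest)
-- ===== Notes on version B (the rewrite author's own statement) =====
-- stated objective: alternative
-- what changed: Replaces the stateful flag-carrying loop with a stateless look-back: each word is decided from its predecessor via zip(words, words[1:]) and a comprehension, then joined.
import Mathlib
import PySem

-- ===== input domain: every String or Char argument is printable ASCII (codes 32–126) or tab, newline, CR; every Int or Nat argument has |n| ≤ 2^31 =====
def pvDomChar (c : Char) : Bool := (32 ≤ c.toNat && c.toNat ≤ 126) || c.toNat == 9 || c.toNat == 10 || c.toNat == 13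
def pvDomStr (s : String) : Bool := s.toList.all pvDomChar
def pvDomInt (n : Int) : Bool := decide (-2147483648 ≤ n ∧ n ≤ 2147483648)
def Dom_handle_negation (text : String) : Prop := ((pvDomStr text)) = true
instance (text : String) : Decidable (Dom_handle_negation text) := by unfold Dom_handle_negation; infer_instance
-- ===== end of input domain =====

-- B replaces A's stateful negate-flag loop by a stateless look-back at the previous word (zip+map); same cost, different decomposition.

-- the literal negation set test 'w in {"not", "hindi"}', shared by both ports
def pvIsNeg (w : String) : Bool := w == "not" || w == "hindi"

-- ===== PORT A =====
def handle_negation (text : String) : String :=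
  let words := PySem.Str.split₀ text
  let st := words.foldl
    (fun (st : List String × Bool) w =>
      let (new_words, negate) := st
      if pvIsNeg w then (new_words ++ [w], true)
      else if negate then (new_words ++ ["NEG_" ++ w], false)
      else (new_words ++ [w], negate))
    ([], false)
  PySem.Str.join " " st.1

-- ===== PORT B =====
def handle_negation_alt (text : String) : String :=
  let words := PySem.Str.split₀ text
  let rest := (words.zip (PySem.List.slice words (some 1) none)).map
    (fun pw => if pvIsNeg pw.1 && !pvIsNeg pw.2 then "NEG_" ++ pw.2 else pw.2)
  PySem.Str.join " " (PySem.List.slice words none (some 1) ++ rest)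

-- ===== PRECONDITION & SPEC =====
def Spec_handle_negation (text : String) (out : String) : Prop := out = handle_negation_alt text
instance (text : String) (out : String) : Decidable (Spec_handle_negation text out) := by unfold Spec_handle_negation; infer_instance

-- ===== CLAIM (what is proved, stated in full; the proofs are below) =====
def Claim_equal_handle_negation : Prop := ∀ (text : String), Dom_handle_negation text → Spec_handle_negation text (handle_negation text)

-- ===== LEMMAS AND PROOFS =====

-- proof-side recursion describing A's loop output
def pvGo : List String → Bool → List String
  | [], _ => []
  | w :: ws, neg =>
    if pvIsNeg w then w :: pvGo ws true
    else if neg then ("NEG_" ++ w) :: pvGo ws false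
    else w :: pvGo ws false

theorem pvFoldA (ws : List String) (neg : Bool) (acc : List String) :
    (ws.foldl
      (fun (st : List String × Bool) w =>
        let (new_words, negate) := st
        if pvIsNeg w then (new_words ++ [w], true)
        else if negate then (new_words ++ ["NEG_" ++ w], false)
        else (new_words ++ [w], negate))
      (acc, neg)).1 = acc ++ pvGo ws neg := by
  induction ws generalizing neg acc with
  | nil => simp [pvGo]
  | cons w ws ih =>
    by_cases h : pvIsNeg w = true <;> cases neg <;>
      simp [pvGo, h, List.foldl_cons, ih]

theorem pvGoZip (ws : List String) (p : String) :
    pvGo ws (pvIsNeg p) =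
      ((p :: ws).zip ws).map
        (fun pw => if pvIsNeg pw.1 && !pvIsNeg pw.2 then "NEG_" ++ pw.2 else pw.2) := by
  induction ws generalizing p with
  | nil => simp [pvGo]
  | cons w ws ih =>
    rw [List.zip_cons_cons, List.map_cons, ← ih w]
    by_cases hw : pvIsNeg w = true <;> by_cases hp : pvIsNeg p = true <;>
      simp [pvGo, hw, hp]

-- ===== VERDICT (by name: the statement is the Claim_ definition above) =====
theorem handle_negation_spec : Claim_equal_handle_negation := by
  intro text _
  unfold Spec_handle_negation handle_negation handle_negation_alt
  cases h : PySem.Str.split₀ text with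
  | nil =>
    have h0 : PySem.List.slice ([] : List String) none (some (1 : Int)) = [] := by
      simpa using PySem.List.slice_to_natCast ([] : List String) 1
    simp [h0]
  | cons w ws =>
    have h1 : PySem.List.slice (w :: ws) (some (1 : Int)) none = ws := by
      simpa using PySem.List.slice_from_one (w :: ws)
    have h2 : PySem.List.slice (w :: ws) none (some (1 : Int)) = [w] := by
      simpa using PySem.List.slice_to_natCast (w :: ws) 1
    simp only [pvFoldA, h1, h2, List.nil_append]
    have h3 : pvGo (w :: ws) false = w :: pvGo ws (pvIsNeg w) := by
      by_cases hw : pvIsNeg w = true <;> simp [pvGo, hw]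
    rw [h3, pvGoZip ws w, List.singleton_append]
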